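-- pv_equiv track=rewrite | github.com/endrizzimarco/roulette-sim | strategies.py | get_unit_distribution
-- ===== SOURCE A (Python) =====
-- def get_unit_distribution(units_to_make):
--     units = 1
--     sequence_sum = 0
--     sequence = []
--
--     while sequence_sum < units_to_make:
--         sequence.append(units)
--         sequence_sum += units
--         units += 1
--
--     if sequence_sum > units_to_make:
--         remainder = sequence_sum - units_to_make
--         sequence[-1] -= remainder
--
--     return sequence
-- ===== SOURCE B (Python) =====
-- def get_unit_distribution(units_to_make):
--     # Closed-form style: find the smallest k with 1+2+...+k >= units_to_make by
--     # exponential + binary search on k, then build range(1, k+1) and trim the last unit.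
--     if units_to_make <= 0:
--         return []
--     hi = 1
--     while hi * (hi + 1) // 2 < units_to_make:
--         hi *= 2
--     lo = 1
--     while lo < hi:
--         mid = (lo + hi) // 2
--         if mid * (mid + 1) // 2 >= units_to_make:
--             hi = mid
--         else:
--             lo = mid + 1
--     k = lo
--     total = k * (k + 1) // 2
--     sequence = list(range(1, k + 1))
--     if total > units_to_make:
--         sequence[-1] -= total - units_to_make
--     return sequence
-- ===== Notes on version B (the rewrite author's own statement) =====
-- stated objective: alternative
-- what changed: Instead of accumulating the running sum one unit at a time, B finds the smallest k whose triangular number reaches units_to_make by exponential plus binary search on k, builds the range directly and trims the last element by the closed-form overshoot.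
import Mathlib
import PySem

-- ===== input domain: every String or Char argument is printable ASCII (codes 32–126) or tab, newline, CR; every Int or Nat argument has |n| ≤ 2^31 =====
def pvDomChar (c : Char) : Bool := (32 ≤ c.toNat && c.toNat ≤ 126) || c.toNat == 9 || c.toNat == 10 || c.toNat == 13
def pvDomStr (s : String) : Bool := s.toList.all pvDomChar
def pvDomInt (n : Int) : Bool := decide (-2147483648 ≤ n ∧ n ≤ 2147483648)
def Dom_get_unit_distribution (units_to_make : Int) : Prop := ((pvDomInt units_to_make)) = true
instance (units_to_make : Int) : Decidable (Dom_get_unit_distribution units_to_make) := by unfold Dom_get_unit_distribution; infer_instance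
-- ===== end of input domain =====

-- B replaces A's one-unit-at-a-time accumulation loop by an exponential + binary search
-- for the smallest k whose triangular number reaches units_to_make (objective: alternative algorithm).
-- The Nat fuel arguments below only bound the loops for totality (each is proved
-- sufficient in the lemmas); they carry no algorithmic content.

-- ===== PORT A =====
-- while sequence_sum < units_to_make: append units; sequence_sum += units; units += 1
def pvA_loop : Nat → Int → Int → Int → List Int → Int × List Int
  | 0, _, _, sum, seq => (sum, seq)
  | fuel + 1, u, units, sum, seq =>
    if sum < u then pvA_loop fuel u (units + 1) (sum + units) (seq ++ [units])
    else (sum, seq)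

-- sequence[-1] -= remainder  (Python raises IndexError on [], which Pre_ excludes)
def pvA_subLast (seq : List Int) (r : Int) : List Int :=
  match seq.getLast? with
  | none => []
  | some x => seq.dropLast ++ [x - r]

def get_unit_distribution (units_to_make : Int) : List Int :=
  let res := pvA_loop units_to_make.toNat units_to_make 1 0 []
  if res.1 > units_to_make then pvA_subLast res.2 (res.1 - units_to_make) else res.2

-- ===== PORT B =====
def pvB_tri (k : Int) : Int := PySem.Int.floordiv (k * (k + 1)) 2

-- while hi*(hi+1)//2 < units_to_make: hi *= 2
def pvB_grow : Nat → Int → Int → Int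
  | 0, _, hi => hi
  | fuel + 1, u, hi => if pvB_tri hi < u then pvB_grow fuel u (2 * hi) else hi

-- while lo < hi: mid = (lo+hi)//2; if tri mid ≥ u: hi = mid else lo = mid+1
def pvB_bs : Nat → Int → Int → Int → Int
  | 0, _, lo, _ => lo
  | fuel + 1, u, lo, hi =>
    if lo < hi then
      let mid := PySem.Int.floordiv (lo + hi) 2
      if u ≤ pvB_tri mid then pvB_bs fuel u lo mid else pvB_bs fuel u (mid + 1) hi
    else lo

def get_unit_distribution_alt (units_to_make : Int) : List Int :=
  if units_to_make ≤ 0 then []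
  else
    let hi := pvB_grow (units_to_make.toNat + 1) units_to_make 1
    let k := pvB_bs (hi - 1).toNat units_to_make 1 hi
    let total := pvB_tri k
    let seq := PySem.List.pyRange 1 (k + 1) 1
    if total > units_to_make then seq.dropLast ++ [k - (total - units_to_make)]
    else seq

-- ===== PRECONDITION & SPEC =====
-- Pre_ excludes negative units_to_make, on which A raises IndexError (sequence[-1] on []).
def Pre_get_unit_distribution (units_to_make : Int) : Prop := 0 ≤ units_to_make
instance (units_to_make : Int) : Decidable (Pre_get_unit_distribution units_to_make) := by
  unfold Pre_get_unit_distribution; infer_instance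

def pvWitness_get_unit_distribution : Int := 7

def Spec_get_unit_distribution (units_to_make : Int) (out : List Int) : Prop := out = get_unit_distribution_alt units_to_make
instance (units_to_make : Int) (out : List Int) : Decidable (Spec_get_unit_distribution units_to_make out) := by unfold Spec_get_unit_distribution; infer_instance

-- ===== CLAIM (what is proved, stated in full; the proofs are below) =====
def Claim_equal_get_unit_distribution : Prop := ∀ (units_to_make : Int), Dom_get_unit_distribution units_to_make → Pre_get_unit_distribution units_to_make → Spec_get_unit_distribution units_to_make (get_unit_distribution units_to_make)

-- ===== LEMMAS AND PROOFS =====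

-- k ≤ tri k for 1 ≤ k
theorem pvB_le_tri (k : Int) (h : 1 ≤ k) : k ≤ pvB_tri k := by
  unfold pvB_tri
  rw [PySem.Int.floordiv_eq_ediv_of_pos (by omega)]
  have h2 : k * (k + 1) = 2 * k + k * (k - 1) := by ring
  have h3 : 0 ≤ k * (k - 1) := mul_nonneg (by omega) (by omega)
  omega

-- proof-side model: pvG a n = a + (a+1) + ... + (a+n-1), pvL a n = [a, a+1, ..., a+n-1]
def pvG (a : Int) : Nat → Int
  | 0 => 0
  | n + 1 => a + pvG (a + 1) n

def pvL (a : Int) : Nat → List Int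
  | 0 => []
  | n + 1 => a :: pvL (a + 1) n

theorem pvG_succ (n : Nat) : ∀ a : Int, pvG a (n + 1) = pvG a n + (a + n) := by
  induction n with
  | zero => intro a; simp [pvG]
  | succ m ih =>
    intro a
    show a + pvG (a+1) (m+1) = (a + pvG (a+1) m) + (a + (m+1 : Nat))
    rw [ih (a+1)]; push_cast; ring

theorem pvL_succ (n : Nat) : ∀ a : Int, pvL a (n + 1) = pvL a n ++ [a + n] := by
  induction n with
  | zero => intro a; simp [pvL]
  | succ m ih =>
    intro a
    show a :: pvL (a+1) (m+1) = (a :: pvL (a+1) m) ++ [a + (m+1 : Nat)]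
    rw [ih (a+1)]; push_cast; simp; ring

theorem pvG_mono (a : Int) (ha : 1 ≤ a) {m n : Nat} (h : m ≤ n) : pvG a m ≤ pvG a n := by
  induction n with
  | zero => simp_all
  | succ k ih =>
    have hs := pvG_succ k a
    have hk : (0 : Int) ≤ (k : Nat) := Int.natCast_nonneg k
    by_cases hmk : m ≤ k
    · have := ih hmk
      omega
    · have hme : m = k + 1 := by omega
      subst hme
      exact le_refl _

theorem pvG_ge (n : Nat) : (n : Int) ≤ pvG 1 n := by
  induction n with
  | zero => simp [pvG]
  | succ m ih => rw [pvG_succ]; push_cast; omega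

-- tri over the naturals equals pvG 1
theorem pvB_tri_natCast (n : Nat) : pvB_tri (n : Int) = pvG 1 n := by
  induction n with
  | zero => simp [pvB_tri, pvG, PySem.Int.floordiv]
  | succ m ih =>
    unfold pvB_tri at *
    rw [PySem.Int.floordiv_eq_ediv_of_pos (by omega)] at *
    rw [pvG_succ]
    have h2 : ((m : Int) + 1) * (((m : Int) + 1) + 1) = (m : Int) * ((m : Int) + 1) + 2 * ((m : Int) + 1) := by ring
    push_cast
    omega

-- characterization of A's loop: if m is the least iteration count reaching the target
-- and the fuel covers it, the loop returns (sum + pvG units m, seq ++ pvL units m)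
theorem pvA_loop_char (m : Nat) : ∀ (fuel : Nat) (u units sum : Int) (seq : List Int),
    m ≤ fuel → u ≤ sum + pvG units m → (∀ j : Nat, j < m → ¬ (u ≤ sum + pvG units j)) →
    pvA_loop fuel u units sum seq = (sum + pvG units m, seq ++ pvL units m) := by
  induction m with
  | zero =>
    intro fuel u units sum seq _ hle _
    simp only [pvG, pvL] at *
    cases fuel with
    | zero => simp [pvA_loop]
    | succ f =>
      rw [pvA_loop]
      simp only [if_neg (by omega : ¬ sum < u)]
      simp
  | succ m ih =>
    intro fuel u units sum seq hf hle hmin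
    have h0 : ¬ (u ≤ sum) := by
      have := hmin 0 (by omega); simpa [pvG] using this
    obtain ⟨f, rfl⟩ : ∃ f, fuel = f + 1 := ⟨fuel - 1, by omega⟩
    rw [pvA_loop]
    simp only [if_pos (by omega : sum < u)]
    rw [ih f u (units + 1) (sum + units) (seq ++ [units]) (by omega)]
    · show _ = (sum + pvG units (m+1), seq ++ pvL units (m+1))
      simp only [pvG, pvL, Prod.mk.injEq]
      exact ⟨by ring, by simp⟩
    · show u ≤ sum + units + pvG (units + 1) m
      have : pvG units (m+1) = units + pvG (units+1) m := rfl
      omega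
    · intro j hj
      have := hmin (j+1) (by omega)
      have : pvG units (j+1) = units + pvG (units+1) j := rfl
      omega

-- the grow loop's result hi' satisfies 1 ≤ hi' and u ≤ tri hi', provided u ≤ hi * 2^fuel
theorem pvB_grow_char : ∀ (fuel : Nat) (u hi : Int), 1 ≤ hi → u ≤ hi * 2 ^ fuel →
    1 ≤ pvB_grow fuel u hi ∧ u ≤ pvB_tri (pvB_grow fuel u hi) := by
  intro fuel
  induction fuel with
  | zero =>
    intro u hi h1 hs
    simp only [pow_zero, mul_one] at hs
    have ht := pvB_le_tri hi h1
    rw [pvB_grow]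
    exact ⟨h1, by omega⟩
  | succ f ih =>
    intro u hi h1 hs
    rw [pvB_grow]
    by_cases hlt : pvB_tri hi < u
    · simp only [if_pos hlt]
      refine ih u (2 * hi) (by omega) ?_
      have : hi * 2 ^ (f + 1) = (2 * hi) * 2 ^ f := by ring
      omega
    · simp only [if_neg hlt]
      exact ⟨h1, by omega⟩

-- characterization of B's binary search
theorem pvB_bs_char (u : Int) : ∀ (fuel : Nat) (lo hi : Int), (hi - lo).toNat ≤ fuel →
    1 ≤ lo → lo ≤ hi → u ≤ pvB_tri hi → ¬ (u ≤ pvB_tri (lo - 1)) →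
    lo ≤ pvB_bs fuel u lo hi ∧ pvB_bs fuel u lo hi ≤ hi ∧
      u ≤ pvB_tri (pvB_bs fuel u lo hi) ∧ ¬ (u ≤ pvB_tri (pvB_bs fuel u lo hi - 1)) := by
  intro fuel
  induction fuel with
  | zero =>
    intro lo hi hn h1 h2 hhi hlo
    have heq : lo = hi := by omega
    rw [pvB_bs]
    exact ⟨le_refl _, h2, by rw [heq]; exact hhi, hlo⟩
  | succ f ih =>
    intro lo hi hn h1 h2 hhi hlo
    by_cases hlt : lo < hi
    · rw [pvB_bs]
      simp only [if_pos hlt]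
      have hb := PySem.Int.floordiv_two_mid_bounds (le_of_lt hlt)
      have hmlt : PySem.Int.floordiv (lo + hi) 2 < hi := by
        rw [PySem.Int.floordiv_eq_ediv_of_pos (by omega)]
        omega
      set mid := PySem.Int.floordiv (lo + hi) 2 with hm
      by_cases hmid : u ≤ pvB_tri mid
      · simp only [if_pos hmid]
        obtain ⟨r1, r2, r3, r4⟩ := ih lo mid (by omega) h1 (by omega) hmid hlo
        exact ⟨r1, by omega, r3, r4⟩
      · simp only [if_neg hmid]
        obtain ⟨r1, r2, r3, r4⟩ := ih (mid + 1) hi (by omega) (by omega) (by omega) hhi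
          (by simpa using hmid)
        exact ⟨by omega, r2, r3, r4⟩
    · rw [pvB_bs]
      simp only [if_neg hlt]
      have heq : lo = hi := by omega
      exact ⟨le_refl _, h2, by rw [heq]; exact hhi, hlo⟩

theorem pvL_eq_pyRange (n : Nat) : ∀ a : Int, pvL a n = PySem.List.pyRange a (a + n) 1 := by
  induction n with
  | zero => intro a; simp [pvL, PySem.List.pyRange_one_eq_nil]
  | succ m ih =>
    intro a
    show a :: pvL (a+1) m = _
    have hm0 : (0 : Int) ≤ (m : Nat) := Int.natCast_nonneg m
    have hcast : a + ((m + 1 : Nat) : Int) = (a + 1) + (m : Nat) := by push_cast; ring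
    rw [hcast, PySem.List.pyRange_one_cons (by omega), ih (a+1)]

theorem pvL_getLast (n : Nat) (hn : 1 ≤ n) (a : Int) : (pvL a n).getLast? = some (a + n - 1) := by
  obtain ⟨m, rfl⟩ : ∃ m, n = m + 1 := ⟨n - 1, by omega⟩
  rw [pvL_succ]
  simp
  ring

-- ===== VERDICT (by name: the statement is the Claim_ definition above) =====
theorem get_unit_distribution_spec : Claim_equal_get_unit_distribution := by
  intro u _ hpre
  unfold Spec_get_unit_distribution get_unit_distribution get_unit_distribution_alt
  by_cases hz : u ≤ 0
  · -- u = 0: A's loop does nothing, B returns []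
    have hu0 : u = 0 := le_antisymm hz hpre
    subst hu0
    norm_num [pvA_loop]
  · simp only [if_neg hz]
    -- the least m with u ≤ pvG 1 m
    have hex : ∃ m : Nat, u ≤ 0 + pvG 1 m := ⟨u.toNat, by have := pvG_ge u.toNat; omega⟩
    let m := Nat.find hex
    have hm : u ≤ 0 + pvG 1 m := Nat.find_spec hex
    have hmin : ∀ j : Nat, j < m → ¬ (u ≤ 0 + pvG 1 j) := fun j hj => Nat.find_min hex hj
    have hmfuel : m ≤ u.toNat := by
      by_contra hcon
      exact hmin u.toNat (by omega) (by have := pvG_ge u.toNat; omega)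
    have hA := pvA_loop_char m u.toNat u 1 0 [] hmfuel hm hmin
    -- B's upper bound hi: u ≤ 1 * 2 ^ (u.toNat + 1)
    have hpow : u ≤ 1 * 2 ^ (u.toNat + 1) := by
      have h1 : (u.toNat : Nat) < 2 ^ (u.toNat + 1) :=
        Nat.lt_of_lt_of_le (Nat.lt_two_pow_self) (Nat.pow_le_pow_right (by norm_num) (by omega))
      have h2 : ((u.toNat : Nat) : Int) < ((2 ^ (u.toNat + 1) : Nat) : Int) := by exact_mod_cast h1
      push_cast at h2 ⊢
      omega
    have hg := pvB_grow_char (u.toNat + 1) u 1 (by omega) hpow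
    set hi := pvB_grow (u.toNat + 1) u 1 with hhi
    have hbs := pvB_bs_char u (hi - 1).toNat 1 hi (by omega) (le_refl _) hg.1 hg.2
      (by simp only [pvB_tri]; norm_num [PySem.Int.floordiv]; omega)
    set k := pvB_bs (hi - 1).toNat u 1 hi with hk
    have hk1 : 1 ≤ k := hbs.1
    -- k = m as integers
    have hkm : k = (m : Int) := by
      have h1 : u ≤ pvB_tri k := hbs.2.2.1
      have h2 : ¬ (u ≤ pvB_tri (k - 1)) := hbs.2.2.2
      rw [show k = ((k.toNat : Int)) by omega] at h1
      rw [show k - 1 = ((k.toNat - 1 : Nat) : Int) by omega] at h2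
      rw [pvB_tri_natCast] at h1 h2
      have hle1 : m ≤ k.toNat := by
        by_contra hcon
        exact hmin k.toNat (by omega) (by omega)
      have hle2 : k.toNat ≤ m := by
        by_contra hcon
        have : pvG 1 m ≤ pvG 1 (k.toNat - 1) := pvG_mono 1 (le_refl _) (by omega)
        omega
      omega
    have hm1 : 1 ≤ m := by
      rcases Nat.eq_zero_or_pos m with h0 | h; · simp [h0, pvG] at hm; omega
      exact h
    -- totals agree
    have htot : pvB_tri k = pvG 1 m := by rw [hkm, pvB_tri_natCast]
    rw [hA]
    simp only [htot, List.nil_append]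
    have hseq : PySem.List.pyRange 1 (k + 1) 1 = pvL 1 m := by
      rw [hkm, pvL_eq_pyRange]
      congr 1
      ring
    rw [hseq]
    by_cases hgt : 0 + pvG 1 m > u
    · simp only [if_pos (by omega : pvG 1 m > u), if_pos hgt]
      unfold pvA_subLast
      rw [pvL_getLast m hm1 1]
      rw [hkm]
      norm_num
    · simp only [if_neg (by omega : ¬ pvG 1 m > u), if_neg hgt]
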